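-- pv_equiv track=rewrite | github.com/Rustam-Z/cracking-maang | backtracking/518. Coin Change II.py | backtracking_solution
-- ===== SOURCE A (Python) =====
-- def backtracking_solution(amount: int, coins: list) -> int:
--     """
--     Algorithm:
--         - Try all combination of numbers.
--
--     Time complexity: O(n^k)
--     Space complexity: O(n^k)
--     """
--     output = []
--
--     def backtrack(curr_sum=0, curr_comb=[]):
--         if curr_sum == amount:
--             output.append(curr_comb[:])
--             return
--
--         for coin in coins:
--             if curr_sum + coin > amount:
--                 continue
--             curr_comb.append(coin)
--             backtrack(curr_sum + coin, curr_comb)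
--             curr_comb.pop()
--
--     backtrack()
--     return output  # [[1, 1, 1, 1, 1], [1, 1, 1, 2], [1, 1, 2, 1], [1, 2, 1, 1], [1, 2, 2], [2, 1, 1, 1], [2, 1, 2], [2, 2, 1], [5]]
-- ===== SOURCE B (Python) =====
-- def backtracking_solution(amount: int, coins: list) -> int:
--     def build(remaining):
--         if remaining == 0:
--             return [[]]
--         return [[coin] + rest
--                 for coin in coins if coin <= remaining
--                 for rest in build(remaining - coin)]
--     return build(amount)
-- ===== Notes on version B (the rewrite author's own statement) =====
-- stated objective: simpler
-- what changed: Replaced the DFS that mutates a shared output list and an append/pop path accumulator with a pure value-returning recursion build(remaining) that combines coin-prefixed sub-solutions by list concatenation, preserving coin order and hence the exact output order.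
import Mathlib
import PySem

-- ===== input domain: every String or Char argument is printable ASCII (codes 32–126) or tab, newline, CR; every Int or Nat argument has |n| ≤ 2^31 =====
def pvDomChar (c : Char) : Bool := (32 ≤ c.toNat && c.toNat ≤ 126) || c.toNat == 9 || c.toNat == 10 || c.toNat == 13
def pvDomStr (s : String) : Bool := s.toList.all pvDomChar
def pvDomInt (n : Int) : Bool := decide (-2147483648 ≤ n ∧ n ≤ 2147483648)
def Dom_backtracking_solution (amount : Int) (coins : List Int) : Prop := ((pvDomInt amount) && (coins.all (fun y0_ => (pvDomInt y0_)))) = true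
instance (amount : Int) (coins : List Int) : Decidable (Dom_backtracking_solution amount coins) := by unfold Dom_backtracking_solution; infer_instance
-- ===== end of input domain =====

-- B replaces A's shared mutable output list and append/pop path accumulator with a pure
-- value-returning recursion that concatenates coin-prefixed sub-solutions (objective: simpler).

-- ===== PORT A =====
-- A's nested `backtrack(curr_sum, curr_comb)` mutating `output`; the extra `fuel`
-- argument only makes the recursion structural in Lean — under Pre_ it never runs out.
def btA (amount : Int) (coins : List Int) : Nat → Int → List Int → List (List Int) → List (List Int)
  | fuel, currSum, currComb, output =>
    if currSum = amount then output ++ [currComb]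
    else
      match fuel with
      | 0 => output
      | f + 1 =>
        coins.foldl
          (fun out coin =>
            if currSum + coin > amount then out
            else btA amount coins f (currSum + coin) (currComb ++ [coin]) out)
          output

def backtracking_solution (amount : Int) (coins : List Int) : List (List Int) :=
  btA amount coins (amount.toNat + 2) 0 [] []

-- ===== PORT B =====
-- B's `build(remaining)`: [[]] at 0, else concatenation of coin-prefixed sub-solutions.
def buildB (coins : List Int) : Nat → Int → List (List Int)
  | 0, _ => []
  | f + 1, remaining =>
    if remaining = 0 then [[]]
    else coins.flatMap
      (fun coin =>
        if coin ≤ remaining then (buildB coins f (remaining - coin)).map (fun rest => coin :: rest)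
        else [])

def backtracking_solution_alt (amount : Int) (coins : List Int) : List (List Int) :=
  buildB coins (amount.toNat + 2) amount

-- ===== PRECONDITION & SPEC =====
-- Pre_ excludes exactly the inputs on which the Python A never returns (RecursionError from
-- unbounded recursion): amount ≠ 0 together with some nonpositive coin c with c ≤ amount and
-- c ≠ amount; on every input satisfying Pre_ the DFS terminates.
def Pre_backtracking_solution (amount : Int) (coins : List Int) : Prop :=
  amount = 0 ∨ ∀ c ∈ coins, c ≤ 0 → (amount < c ∨ c = amount)

instance (amount : Int) (coins : List Int) : Decidable (Pre_backtracking_solution amount coins) := by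
  unfold Pre_backtracking_solution; infer_instance

def pvWitness_backtracking_solution : Int × List Int := (5, [1, 2, 5])

def Spec_backtracking_solution (amount : Int) (coins : List Int) (out : List (List Int)) : Prop := out = backtracking_solution_alt amount coins
instance (amount : Int) (coins : List Int) (out : List (List Int)) : Decidable (Spec_backtracking_solution amount coins out) := by unfold Spec_backtracking_solution; infer_instance

-- ===== CLAIM (what is proved, stated in full; the proofs are below) =====
def Claim_equal_backtracking_solution : Prop := ∀ (amount : Int) (coins : List Int), Dom_backtracking_solution amount coins → Pre_backtracking_solution amount coins → Spec_backtracking_solution amount coins (backtracking_solution amount coins)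

-- ===== LEMMAS AND PROOFS =====

-- Main invariant (all coins positive below amount's reach): A's accumulator run equals
-- `output` followed by B's solutions for the remaining amount, each prefixed with the
-- current partial combination.
theorem btA_eq_buildB (amount : Int) (coins : List Int)
    (hpre : ∀ c ∈ coins, c ≤ 0 → amount < c) :
    ∀ (fuel : Nat) (currSum : Int) (currComb : List Int) (output : List (List Int)),
      0 ≤ currSum → currSum ≤ amount → (amount - currSum).toNat < fuel →
      btA amount coins fuel currSum currComb output
        = output ++ (buildB coins fuel (amount - currSum)).map (fun r => currComb ++ r) := by
  intro fuel
  induction fuel with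
  | zero => intro currSum currComb output _ _ hf; omega
  | succ f ih =>
    intro currSum currComb output h0 hle hf
    by_cases heq : currSum = amount
    · subst heq
      simp [btA, buildB]
    · have hrem : amount - currSum ≠ 0 := by omega
      rw [btA, if_neg heq, buildB, if_neg hrem]
      -- generalized foldl over any sublist of coins
      have key : ∀ (l : List Int), (∀ c ∈ l, c ∈ coins) → ∀ (out : List (List Int)),
          List.foldl
            (fun out coin =>
              if currSum + coin > amount then out
              else btA amount coins f (currSum + coin) (currComb ++ [coin]) out)
            out l
          = out ++ (l.flatMap
              (fun coin =>
                if coin ≤ amount - currSum then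
                  (buildB coins f (amount - currSum - coin)).map (fun rest => coin :: rest)
                else [])).map (fun r => currComb ++ r) := by
        intro l
        induction l with
        | nil => intro _ out; simp
        | cons c l ihl =>
          intro hmem out
          rw [List.foldl_cons, List.flatMap_cons]
          by_cases hc : currSum + c > amount
          · have hc' : ¬ c ≤ amount - currSum := by omega
            rw [if_pos hc, if_neg hc']
            simp only [List.nil_append]
            exact ihl (fun x hx => hmem x (List.mem_cons_of_mem _ hx)) out
          · have hc' : c ≤ amount - currSum := by omega
            -- the taken coin is positive under the hypothesis
            have hcpos : 0 < c := by
              by_contra hnp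
              have := hpre c (hmem c (List.mem_cons_self)) (by omega)
              omega
            have hstep : btA amount coins f (currSum + c) (currComb ++ [c]) out
                = out ++ (buildB coins f (amount - (currSum + c))).map
                    (fun r => (currComb ++ [c]) ++ r) := by
              apply ih <;> omega
            rw [if_neg hc, if_pos hc', hstep]
            rw [ihl (fun x hx => hmem x (List.mem_cons_of_mem _ hx))]
            have : amount - (currSum + c) = amount - currSum - c := by ring
            rw [this]
            simp [List.map_map, Function.comp]
      rw [key coins (fun _ h => h) output]

-- Negative amount: at the root every coin is either skipped (c > amount) or equals amount
-- exactly, in which case both sides contribute the single combination [c].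
theorem neg_case (amount : Int) (coins : List Int) (hneg : amount < 0) :
    ∀ (l : List Int), (∀ c ∈ l, amount < c ∨ c = amount) → ∀ (out : List (List Int)),
      List.foldl
        (fun out coin =>
          if (0:Int) + coin > amount then out
          else btA amount coins 1 (0 + coin) ([] ++ [coin]) out)
        out l
      = out ++ l.flatMap
          (fun coin =>
            if coin ≤ amount then (buildB coins 1 (amount - coin)).map (fun rest => coin :: rest)
            else []) := by
  intro l
  induction l with
  | nil => intro _ out; simp
  | cons c l ihl =>
    intro hmem out
    rw [List.foldl_cons, List.flatMap_cons]
    rcases hmem c List.mem_cons_self with hgt | heq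
    · rw [if_pos (by omega), if_neg (by omega)]
      simp only [List.nil_append]
      exact ihl (fun x hx => hmem x (List.mem_cons_of_mem _ hx)) out
    · subst heq
      rw [if_neg (by omega), if_pos (le_refl _)]
      have hb : buildB coins 1 (c - c) = [[]] := by
        rw [buildB, if_pos (by ring)]
      have ha : btA c coins 1 (0 + c) ([] ++ [c]) out = out ++ [[c]] := by
        rw [btA, if_pos (by ring_nf)]; simp
      rw [hb, ha, ihl (fun x hx => hmem x (List.mem_cons_of_mem _ hx))]
      simp

theorem backtracking_solution_spec' (amount : Int) (coins : List Int)
    (hpre : Pre_backtracking_solution amount coins) :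
    backtracking_solution amount coins = backtracking_solution_alt amount coins := by
  unfold backtracking_solution backtracking_solution_alt
  by_cases h0 : amount = 0
  · subst h0
    simp [btA, buildB]
  by_cases hneg : amount < 0
  · -- amount negative: fuel is 2; only coins equal to amount contribute
    have h1 : amount.toNat = 0 := by omega
    rw [h1]
    have hmem : ∀ c ∈ coins, amount < c ∨ c = amount := by
      intro c hc
      rcases hpre with h | h
      · omega
      · by_cases hcpos : c ≤ 0
        · exact h c hc hcpos
        · left; omega
    rw [btA, if_neg (by omega), buildB, if_neg h0]
    exact neg_case amount coins hneg coins hmem []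
  · -- amount positive: every nonpositive coin exceeds amount, the main invariant applies
    have hpre' : ∀ c ∈ coins, c ≤ 0 → amount < c := by
      intro c hc hc0
      rcases hpre with h | h
      · omega
      · rcases h c hc hc0 with h' | h' <;> omega
    have h := btA_eq_buildB amount coins hpre' (amount.toNat + 2) 0 [] []
      (by omega) (by omega) (by omega)
    simpa using h

-- ===== VERDICT (by name: the statement is the Claim_ definition above) =====
theorem backtracking_solution_spec : Claim_equal_backtracking_solution := by
  intro amount coins _ hpre
  exact backtracking_solution_spec' amount coins hpre
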